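-- pv_equiv track=rewrite | github.com/baschni/21norm | helper.py | get_open_brackets
-- ===== SOURCE A (Python) =====
-- def get_open_brackets(line, index):
-- 	brackets = 0
-- 	for c in line[:index]:
-- 		if c == "(":
-- 			brackets += 1
-- 		elif c == ")":
-- 			if brackets > 0:
-- 				brackets -= 1
-- 	return (brackets)
-- ===== SOURCE B (Python) =====
-- def get_open_brackets(line, index):
-- 	balance = 0
-- 	min_balance = 0
-- 	for c in line[:index]:
-- 		if c == "(":
-- 			balance += 1
-- 		elif c == ")":
-- 			balance -= 1
-- 		if balance < min_balance:
-- 			min_balance = balance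
-- 	return balance - min_balance
-- ===== Notes on version B (the rewrite author's own statement) =====
-- stated objective: alternative
-- what changed: Replaces the per-step clamp (decrement only when brackets > 0) by an unclamped running balance plus a running minimum, returning balance - min_balance after one pass.
import Mathlib
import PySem

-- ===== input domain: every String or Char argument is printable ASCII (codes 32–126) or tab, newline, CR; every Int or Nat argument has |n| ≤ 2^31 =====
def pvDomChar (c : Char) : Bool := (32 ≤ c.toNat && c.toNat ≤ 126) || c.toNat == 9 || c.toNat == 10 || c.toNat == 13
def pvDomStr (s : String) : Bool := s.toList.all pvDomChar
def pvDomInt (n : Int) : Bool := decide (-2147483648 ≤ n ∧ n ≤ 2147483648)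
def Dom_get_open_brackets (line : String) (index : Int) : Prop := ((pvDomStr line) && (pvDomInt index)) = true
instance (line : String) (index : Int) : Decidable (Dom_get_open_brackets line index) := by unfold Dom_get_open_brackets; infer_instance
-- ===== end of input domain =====

-- B replaces A's per-step clamp by an unclamped balance with a running minimum; same value, same cost (objective: alternative).

-- ===== PORT A =====
def get_open_brackets (line : String) (index : Int) : Int :=
  (PySem.List.slice line.toList none (some index)).foldl
    (fun brackets c =>
      if c = '(' then brackets + 1
      else if c = ')' then (if brackets > 0 then brackets - 1 else brackets)
      else brackets) 0

-- ===== PORT B =====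
def get_open_brackets_alt (line : String) (index : Int) : Int :=
  let st := (PySem.List.slice line.toList none (some index)).foldl
    (fun st c =>
      let bal := if c = '(' then st.1 + 1 else if c = ')' then st.1 - 1 else st.1
      (bal, if bal < st.2 then bal else st.2)) ((0 : Int), (0 : Int))
  st.1 - st.2

-- ===== PRECONDITION & SPEC =====
def Spec_get_open_brackets (line : String) (index : Int) (out : Int) : Prop := out = get_open_brackets_alt line index
instance (line : String) (index : Int) (out : Int) : Decidable (Spec_get_open_brackets line index out) := by unfold Spec_get_open_brackets; infer_instance

-- ===== CLAIM (what is proved, stated in full; the proofs are below) =====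
def Claim_equal_get_open_brackets : Prop := ∀ (line : String) (index : Int), Dom_get_open_brackets line index → Spec_get_open_brackets line index (get_open_brackets line index)

-- ===== LEMMAS AND PROOFS =====

-- Loop invariant: A's clamped counter equals B's balance minus its running minimum.
lemma clamp_eq_bal_sub_min (l : List Char) (bal minb : Int)
    (h1 : minb ≤ bal) (h2 : minb ≤ 0) :
    l.foldl
      (fun brackets c =>
        if c = '(' then brackets + 1
        else if c = ')' then (if brackets > 0 then brackets - 1 else brackets)
        else brackets) (bal - minb)
    = (l.foldl
        (fun st c =>
          let b := if c = '(' then st.1 + 1 else if c = ')' then st.1 - 1 else st.1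
          (b, if b < st.2 then b else st.2)) (bal, minb)).1
      - (l.foldl
        (fun st c =>
          let b := if c = '(' then st.1 + 1 else if c = ')' then st.1 - 1 else st.1
          (b, if b < st.2 then b else st.2)) (bal, minb)).2 := by
  induction l generalizing bal minb with
  | nil => simp
  | cons c l ih =>
    simp only [List.foldl_cons]
    by_cases hc1 : c = '('
    · simp only [hc1, reduceIte]
      have e1 : bal - minb + 1 = (bal + 1) - minb := by omega
      have e2 : (if bal + 1 < minb then bal + 1 else minb) = minb := by omega
      rw [e1, e2]
      exact ih (bal + 1) minb (by omega) h2
    · by_cases hc2 : c = ')'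
      · simp only [hc2, reduceIte, Char.reduceEq]
        by_cases hpos : bal - minb > 0
        · rw [if_pos hpos]
          have e1 : bal - minb - 1 = (bal - 1) - minb := by omega
          have e2 : (if bal - 1 < minb then bal - 1 else minb) = minb := by omega
          rw [e1, e2]
          exact ih (bal - 1) minb (by omega) h2
        · rw [if_neg hpos]
          have hbm : bal = minb := by omega
          have e1 : bal - minb = (bal - 1) - (bal - 1) := by omega
          have e2 : (if bal - 1 < minb then bal - 1 else minb) = bal - 1 := by omega
          rw [e1, e2, hbm]
          exact ih (minb - 1) (minb - 1) (by omega) (by omega)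
      · simp only [if_neg hc1, if_neg hc2]
        have e2 : (if bal < minb then bal else minb) = minb := by omega
        rw [e2]
        exact ih bal minb h1 h2

-- ===== VERDICT (by name: the statement is the Claim_ definition above) =====
theorem get_open_brackets_spec : Claim_equal_get_open_brackets := by
  intro line index _
  unfold Spec_get_open_brackets get_open_brackets get_open_brackets_alt
  simpa using clamp_eq_bal_sub_min (PySem.List.slice line.toList none (some index)) 0 0 le_rfl le_rfl
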